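-- pv_equiv track=rewrite | github.com/yowatanabe/learn-to-code | python/356/main.py | max_of_window_min_abs_diff
-- ===== SOURCE A (Python) =====
-- from typing import List
-- import bisect
--
-- def max_of_window_min_abs_diff(nums: List[int], k: int) -> int:
--     if k <= 1:
--         # 2要素が無いので「任意の2要素の差の最小」は定義しづらいが、
--         # 実務/面接では k>=2 とすることが多い。ここでは 0 とする。
--         return 0
--
--     window = []  # ソート済みリスト
--
--     def window_min_diff(arr: List[int]) -> int:
--         # arr はソート済み。隣接差の最小が答え
--         best = 10**30
--         for i in range(1, len(arr)):
--             d = arr[i] - arr[i - 1]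
--             if d < best:
--                 best = d
--                 if best == 0:
--                     return 0
--         return best
--
--     # 初期ウィンドウ
--     for x in nums[:k]:
--         bisect.insort(window, x)
--
--     ans = window_min_diff(window)
--
--     # スライド
--     for i in range(k, len(nums)):
--         out = nums[i - k]
--         inp = nums[i]
--
--         # 削除（同値があるので左端を消す）
--         idx = bisect.bisect_left(window, out)
--         window.pop(idx)
--
--         # 追加
--         bisect.insort(window, inp)
--
--         ans = max(ans, window_min_diff(window))
--
--     return ans
-- ===== SOURCE B (Python) =====
-- from typing import List
--
-- def max_of_window_min_abs_diff(nums: List[int], k: int) -> int: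
--     if k <= 1:
--         return 0
--
--     def min_adjacent_diff(window: List[int]) -> int:
--         s = sorted(window)
--         return min((b - a for a, b in zip(s, s[1:])), default=10**30)
--
--     return max(min_adjacent_diff(nums[i:i + k])
--                for i in range(max(1, len(nums) - k + 1)))
-- ===== Notes on version B (the rewrite author's own statement) =====
-- stated objective: simpler
-- what changed: Replaced A's incrementally maintained sorted window (bisect insort/pop plus an early-exit rescan of adjacent differences per slide) by a direct stateless recomputation: for every window start, sort the slice and take the minimum adjacent difference, then take the maximum over all windows.
import Mathlib
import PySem

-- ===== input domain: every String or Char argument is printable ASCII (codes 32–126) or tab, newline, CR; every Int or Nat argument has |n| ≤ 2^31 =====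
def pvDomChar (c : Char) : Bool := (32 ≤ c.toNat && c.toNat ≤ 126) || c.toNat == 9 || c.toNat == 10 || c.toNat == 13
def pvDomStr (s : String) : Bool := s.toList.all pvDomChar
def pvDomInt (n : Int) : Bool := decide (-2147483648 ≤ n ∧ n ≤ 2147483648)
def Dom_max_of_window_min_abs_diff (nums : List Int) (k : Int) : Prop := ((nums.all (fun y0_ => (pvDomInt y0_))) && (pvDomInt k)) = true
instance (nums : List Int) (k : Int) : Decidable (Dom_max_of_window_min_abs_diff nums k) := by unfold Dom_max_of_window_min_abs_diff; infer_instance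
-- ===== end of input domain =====

-- B replaces A's incrementally maintained sorted window (insort/pop + rescan) by a direct
-- per-window recomputation (sort each slice, min adjacent difference, max over windows): simpler, not faster.


-- ===== PORT A =====
-- window_min_diff: the for-loop over i in range(1, len(arr)) as the obvious structural
-- recursion over the tail, carrying (previous element, best) — same d's, same order, same early return at 0.
def pvWmdAux : Int → Int → List Int → Int
  | _, best, [] => best
  | prev, best, x :: xs =>
      let d := x - prev
      if d < best then (if d = 0 then 0 else pvWmdAux x d xs) else pvWmdAux x best xs

def pvWmdA : List Int → Int
  | [] => 10 ^ 30
  | a :: rest => pvWmdAux a (10 ^ 30) rest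

-- bisect.insort(window, x): insert at the bisect_right position
def pvInsort (w : List Int) (x : Int) : List Int :=
  PySem.List.insert w ((PySem.List.bisectRight w x : Nat) : Int) x

-- idx = bisect_left(window, out); window.pop(idx).  The .getD fallback is never used on A's
-- runs (out is always in the window, so idx is in range — proved below); exact wherever Python returns.
def pvDel (w : List Int) (x : Int) : List Int :=
  ((PySem.List.pop? w ((PySem.List.bisectLeft w x : Nat) : Int)).map Prod.snd).getD w

def pvStepA (nums : List Int) (k : Int) (st : List Int × Int) (i : Int) : List Int × Int :=
  let out := PySem.List.pyGetD nums (i - k) 0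
  let inp := PySem.List.pyGetD nums i 0
  let w2 := pvInsort (pvDel st.1 out) inp
  (w2, max st.2 (pvWmdA w2))

def max_of_window_min_abs_diff (nums : List Int) (k : Int) : Int :=
  if k ≤ 1 then 0
  else
    let window := (PySem.List.slice nums none (some k)).foldl pvInsort []
    let ans := pvWmdA window
    ((PySem.List.pyRange k (nums.length : Int) 1).foldl (pvStepA nums k) (window, ans)).2

-- ===== PORT B =====
-- min_adjacent_diff: sort the window, min over b - a for (a, b) in zip(s, s[1:]), default 10**30
def pvMinAdj (w : List Int) : Int :=
  let s := PySem.List.sorted w (fun x => x) false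
  PySem.List.minD ((s.zip (PySem.List.slice s (some 1) none)).map (fun p => p.2 - p.1))
    (fun d => d) (10 ^ 30)

def max_of_window_min_abs_diff_alt (nums : List Int) (k : Int) : Int :=
  if k ≤ 1 then 0
  else
    let vals := (PySem.List.pyRange 0 (max 1 ((nums.length : Int) - k + 1)) 1).map
      (fun i => pvMinAdj (PySem.List.slice nums (some i) (some (i + k))))
    (PySem.List.max? vals (fun x => x)).getD 0

-- ===== PRECONDITION & SPEC =====
def Spec_max_of_window_min_abs_diff (nums : List Int) (k : Int) (out : Int) : Prop := out = max_of_window_min_abs_diff_alt nums k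
instance (nums : List Int) (k : Int) (out : Int) : Decidable (Spec_max_of_window_min_abs_diff nums k out) := by unfold Spec_max_of_window_min_abs_diff; infer_instance

-- ===== CLAIM (what is proved, stated in full; the proofs are below) =====
def Claim_equal_max_of_window_min_abs_diff : Prop := ∀ (nums : List Int) (k : Int), Dom_max_of_window_min_abs_diff nums k → Spec_max_of_window_min_abs_diff nums k (max_of_window_min_abs_diff nums k)

-- ===== LEMMAS AND PROOFS =====

-- adjacent differences of prev :: xs, in traversal order
def pvDiffs : Int → List Int → List Int
  | _, [] => []
  | prev, x :: xs => (x - prev) :: pvDiffs x xs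

theorem pvZip_tail_diffs (a : Int) (l : List Int) :
    ((a :: l).zip l).map (fun p : Int × Int => p.2 - p.1) = pvDiffs a l := by
  induction l generalizing a with
  | nil => rfl
  | cons x xs ih =>
    simp only [List.zip_cons_cons, List.map_cons, pvDiffs]
    rw [ih]

theorem pvFoldl_min_of_le (l : List Int) (a : Int) (h : ∀ y ∈ l, a ≤ y) :
    l.foldl min a = a := by
  induction l with
  | nil => rfl
  | cons x xs ih =>
    have hax : a ≤ x := h x (by simp)
    simp only [List.foldl_cons, min_eq_left hax]
    exact ih (fun y hy => h y (by simp [hy]))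

theorem pvDiffs_nonneg (a : Int) (l : List Int)
    (h : List.Pairwise (fun x y : Int => x ≤ y) (a :: l)) :
    ∀ y ∈ pvDiffs a l, (0 : Int) ≤ y := by
  induction l generalizing a with
  | nil => intro y hy; simp [pvDiffs] at hy
  | cons x xs ih =>
    intro y hy
    rcases List.pairwise_cons.1 h with ⟨ha, hrest⟩
    simp only [pvDiffs, List.mem_cons] at hy
    rcases hy with rfl | hy
    · have := ha x (by simp); omega
    · exact ih x hrest y hy

theorem pvWmdAux_eq (xs : List Int) : ∀ (prev best : Int),
    List.Pairwise (fun x y : Int => x ≤ y) (prev :: xs) →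
    pvWmdAux prev best xs = (pvDiffs prev xs).foldl min best := by
  induction xs with
  | nil => intro prev best _; rfl
  | cons x xs ih =>
    intro prev best h
    rcases List.pairwise_cons.1 h with ⟨ha, hrest⟩
    have hpx : prev ≤ x := ha x (by simp)
    simp only [pvWmdAux, pvDiffs, List.foldl_cons]
    by_cases hlt : x - prev < best
    · rw [if_pos hlt]
      by_cases hz : x - prev = 0
      · rw [if_pos hz]
        have hmin : min best (x - prev) = 0 := by omega
        rw [hmin]
        exact (pvFoldl_min_of_le _ _ (pvDiffs_nonneg x xs hrest)).symm
      · rw [if_neg hz, ih x (x - prev) hrest]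
        have : min best (x - prev) = x - prev := by omega
        rw [this]
    · rw [if_neg hlt, ih x best hrest]
      have : min best (x - prev) = best := by omega
      rw [this]

theorem pvWmd_eq_minAdj (w : List Int)
    (hb : ∀ x ∈ w, -2147483648 ≤ x ∧ x ≤ 2147483648) :
    pvWmdA (PySem.List.sorted w (fun x => x) false) = pvMinAdj w := by
  have h30 : (10 : Int) ^ 30 = 1000000000000000000000000000000 := by norm_num
  have hs : List.Pairwise (fun a b : Int => a ≤ b) (PySem.List.sorted w (fun x => x) false) :=
    PySem.List.sorted_pairwise w (fun x => x)
  simp only [pvMinAdj, PySem.List.slice_from_one]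
  cases hsEq : PySem.List.sorted w (fun x => x) false with
  | nil => rfl
  | cons a t =>
    rw [hsEq] at hs
    have hWmd : pvWmdA (a :: t) = (pvDiffs a t).foldl min (10 ^ 30) := by
      simp only [pvWmdA]
      exact pvWmdAux_eq t a (10 ^ 30) hs
    rw [hWmd, List.tail_cons, pvZip_tail_diffs a t]
    cases t with
    | nil => rfl
    | cons x xs =>
      have haw : a ∈ w := (PySem.List.mem_sorted w (fun x => x) false a).1 (by rw [hsEq]; simp)
      have hxw : x ∈ w := (PySem.List.mem_sorted w (fun x => x) false x).1 (by rw [hsEq]; simp)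
      have hba := hb a haw
      have hbx := hb x hxw
      have hle : x - a ≤ 10 ^ 30 := by omega
      simp only [pvDiffs, List.foldl_cons, PySem.List.minD, PySem.List.min?_id_cons,
        Option.getD_some]
      have : min (10 ^ 30 : Int) (x - a) = x - a := by omega
      rw [this]

theorem pvInsort_sorted_perm (w : List Int) (x : Int)
    (h : List.Pairwise (fun a b : Int => a ≤ b) w) :
    List.Pairwise (fun a b : Int => a ≤ b) (pvInsort w x) ∧ (pvInsort w x).Perm (x :: w) := by
  obtain ⟨hplen, hlt, hge⟩ := PySem.List.bisectRight_spec w x h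
  rw [pvInsort, PySem.List.insert_natCast w _ x hplen]
  constructor
  · rw [List.pairwise_append]
    refine ⟨h.sublist (List.take_sublist _ _), ?_, ?_⟩
    · rw [List.pairwise_cons]
      constructor
      · intro b hbmem
        obtain ⟨i, hi, hbi⟩ := List.mem_iff_getElem.1 hbmem
        simp only [List.length_drop] at hi
        rw [List.getElem_drop] at hbi
        rw [← hbi]
        exact le_of_lt (hge _ (by omega) (Nat.le_add_right _ _))
      · exact h.sublist (List.drop_sublist _ _)
    · intro a hamem b hbmem
      obtain ⟨j, hj, haj⟩ := List.mem_iff_getElem.1 hamem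
      simp only [List.length_take] at hj
      rw [List.getElem_take] at haj
      have hax : a ≤ x := by
        rw [← haj]; exact hlt j (by omega) (by omega)
      rcases List.mem_cons.1 hbmem with rfl | hbd
      · exact hax
      · obtain ⟨i, hi, hbi⟩ := List.mem_iff_getElem.1 hbd
        simp only [List.length_drop] at hi
        rw [List.getElem_drop] at hbi
        have hxb : x < b := by
          rw [← hbi]; exact hge _ (by omega) (Nat.le_add_right _ _)
        exact le_of_lt (lt_of_le_of_lt hax hxb)
  · have hperm : (List.take (PySem.List.bisectRight w x) w ++ x :: List.drop (PySem.List.bisectRight w x) w).Perm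
        (x :: (List.take (PySem.List.bisectRight w x) w ++ List.drop (PySem.List.bisectRight w x) w)) :=
      List.perm_middle
    rwa [List.take_append_drop] at hperm

theorem pvDel_sorted_perm (w : List Int) (x : Int)
    (h : List.Pairwise (fun a b : Int => a ≤ b) w) (hm : x ∈ w) :
    List.Pairwise (fun a b : Int => a ≤ b) (pvDel w x) ∧ (x :: pvDel w x).Perm w := by
  obtain ⟨hplen, hlt, hge⟩ := PySem.List.bisectLeft_spec w x h
  obtain ⟨t, ht, hwt⟩ := List.mem_iff_getElem.1 hm
  have hpt : PySem.List.bisectLeft w x ≤ t := by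
    by_contra hc
    rw [not_le] at hc
    have := hlt t ht hc
    omega
  have hplt : PySem.List.bisectLeft w x < w.length := lt_of_le_of_lt hpt ht
  have hwp : w[PySem.List.bisectLeft w x] = x := by
    have h1 : x ≤ w[PySem.List.bisectLeft w x] := hge _ hplt (le_refl _)
    have h2 : w[PySem.List.bisectLeft w x] ≤ w[t] := by
      rcases Nat.eq_or_lt_of_le hpt with heq | hlt'
      · simp [heq]
      · exact List.pairwise_iff_getElem.1 h _ _ _ _ hlt'
    omega
  have hdel : pvDel w x = w.eraseIdx (PySem.List.bisectLeft w x) := by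
    rw [pvDel, PySem.List.pop?_natCast w _ hplt]
    rfl
  rw [hdel]
  constructor
  · exact h.sublist (List.eraseIdx_sublist w _)
  · rw [List.eraseIdx_eq_take_drop_succ]
    have h2 : List.take (PySem.List.bisectLeft w x) w ++ x :: List.drop (PySem.List.bisectLeft w x + 1) w = w := by
      conv_rhs => rw [← List.take_append_drop (PySem.List.bisectLeft w x) w]
      rw [List.drop_eq_getElem_cons hplt, hwp]
    have h1 : (x :: (List.take (PySem.List.bisectLeft w x) w ++ List.drop (PySem.List.bisectLeft w x + 1) w)).Perm
        (List.take (PySem.List.bisectLeft w x) w ++ x :: List.drop (PySem.List.bisectLeft w x + 1) w) :=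
      List.perm_middle.symm
    exact h1.trans (by rw [h2])

theorem pvFoldl_insort (l : List Int) : ∀ (w : List Int),
    List.Pairwise (fun a b : Int => a ≤ b) w →
    List.Pairwise (fun a b : Int => a ≤ b) (l.foldl pvInsort w) ∧
      (l.foldl pvInsort w).Perm (w ++ l) := by
  induction l with
  | nil => intro w hw; exact ⟨hw, by simp⟩
  | cons y l ih =>
    intro w hw
    simp only [List.foldl_cons]
    obtain ⟨hs1, hp1⟩ := pvInsort_sorted_perm w y hw
    obtain ⟨hs2, hp2⟩ := ih (pvInsort w y) hs1
    refine ⟨hs2, ?_⟩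
    have c3 : ((y :: w) ++ l).Perm (w ++ y :: l) := by
      simp only [List.cons_append]
      exact List.perm_middle.symm
    exact hp2.trans ((hp1.append_right l).trans c3)

-- the slide step: from the sorted previous window to the sorted next window
theorem pvStep_eq (nums : List Int) (k i : Int) (ans : Int)
    (hb : ∀ x ∈ nums, -2147483648 ≤ x ∧ x ≤ 2147483648)
    (hk : 2 ≤ k) (hki : k ≤ i) (hin : i < (nums.length : Int)) :
    pvStepA nums k
      (PySem.List.sorted (PySem.List.slice nums (some (i - k)) (some i)) (fun x => x) false, ans) i
    = (PySem.List.sorted (PySem.List.slice nums (some (i - k + 1)) (some (i - k + 1 + k))) (fun x => x) false,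
       max ans (pvMinAdj (PySem.List.slice nums (some (i - k + 1)) (some (i - k + 1 + k))))) := by
  have hnn : (0 : Int) ≤ i - k := by omega
  set a := (i - k).toNat with haDef
  set b := i.toNat with hbDef
  have hai : ((a : Int)) = i - k := by omega
  have hbi : ((b : Int)) = i := by omega
  have hbLen : b < nums.length := by omega
  have haLen : a < nums.length := by omega
  have hab : a + 2 ≤ b := by omega
  have hbak : b - a = (b - a - 1) + 1 := by omega
  -- the previous window as a cons
  have e1 : PySem.List.slice nums (some (i - k)) (some i)
      = nums[a] :: List.take (b - a - 1) (List.drop (a + 1) nums) := by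
    conv_lhs => rw [← hai, ← hbi, PySem.List.slice_natCast, hbak,
      List.drop_eq_getElem_cons haLen, List.take_succ_cons]
  -- the next window as the old tail plus the new element
  have e2 : PySem.List.slice nums (some (i - k + 1)) (some (i - k + 1 + k))
      = List.take (b - a - 1) (List.drop (a + 1) nums) ++ [nums[b]] := by
    have h2 : i - k + 1 + k = ((b + 1 : Nat) : Int) := by omega
    have h1 : i - k + 1 = ((a + 1 : Nat) : Int) := by omega
    have h3 : b + 1 - (a + 1) = (b - a - 1) + 1 := by omega
    rw [h2, h1, PySem.List.slice_natCast, h3, List.take_add_one]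
    congr 1
    rw [List.getElem?_drop]
    have h4 : a + 1 + (b - a - 1) = b := by omega
    rw [h4, List.getElem?_eq_getElem hbLen]
    rfl
  rw [e1, e2]
  set t := List.take (b - a - 1) (List.drop (a + 1) nums) with htDef
  have htmem : ∀ x ∈ t, x ∈ nums := by
    intro x hx
    exact List.mem_of_mem_drop (List.mem_of_mem_take hx)
  -- sortedness facts
  have hWs : List.Pairwise (fun x y : Int => x ≤ y)
      (PySem.List.sorted (nums[a] :: t) (fun x => x) false) :=
    PySem.List.sorted_pairwise _ (fun x => x)
  have hWperm := PySem.List.sorted_perm (nums[a] :: t) (fun x : Int => x) false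
  have hout_mem : nums[a] ∈ PySem.List.sorted (nums[a] :: t) (fun x => x) false := by
    rw [PySem.List.mem_sorted]; simp
  obtain ⟨hds, hdp⟩ := pvDel_sorted_perm _ nums[a] hWs hout_mem
  have hdperm : (pvDel (PySem.List.sorted (nums[a] :: t) (fun x => x) false) nums[a]).Perm t :=
    (hdp.trans hWperm).cons_inv
  obtain ⟨his, hip⟩ := pvInsort_sorted_perm _ nums[b] hds
  have hinsperm : (pvInsort (pvDel (PySem.List.sorted (nums[a] :: t) (fun x => x) false) nums[a]) nums[b]).Perm
      (t ++ [nums[b]]) :=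
    (hip.trans (hdperm.cons nums[b])).trans (List.perm_append_singleton _ _).symm
  have hw2 : pvInsort (pvDel (PySem.List.sorted (nums[a] :: t) (fun x => x) false) nums[a]) nums[b]
      = PySem.List.sorted (t ++ [nums[b]]) (fun x => x) false :=
    (PySem.List.sorted_id_eq_of_perm_of_pairwise _ _ hinsperm his).symm
  -- evaluate the step
  have hout : PySem.List.pyGetD nums (i - k) 0 = nums[a] := by
    rw [← hai, PySem.List.pyGetD_natCast]
    exact List.getD_eq_getElem nums 0 haLen
  have hinp : PySem.List.pyGetD nums i 0 = nums[b] := by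
    rw [← hbi, PySem.List.pyGetD_natCast]
    exact List.getD_eq_getElem nums 0 hbLen
  have hbounds : ∀ x ∈ t ++ [nums[b]], -2147483648 ≤ x ∧ x ≤ 2147483648 := by
    intro x hx
    rcases List.mem_append.1 hx with hx | hx
    · exact hb x (htmem x hx)
    · rcases List.mem_singleton.1 hx with rfl
      exact hb _ (List.getElem_mem hbLen)
  simp only [pvStepA, hout, hinp]
  rw [hw2, pvWmd_eq_minAdj _ hbounds]

theorem pvLoopA (nums : List Int) (k : Int)
    (hb : ∀ x ∈ nums, -2147483648 ≤ x ∧ x ≤ 2147483648) (hk : 2 ≤ k) :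
    ∀ (cnt : Nat) (i ans : Int), k ≤ i → i + cnt = (nums.length : Int) →
    ((PySem.List.pyRange i (nums.length : Int) 1).foldl (pvStepA nums k)
        (PySem.List.sorted (PySem.List.slice nums (some (i - k)) (some i)) (fun x => x) false, ans)).2
    = (PySem.List.pyRange (i - k + 1) ((nums.length : Int) - k + 1) 1).foldl
        (fun acc s => max acc (pvMinAdj (PySem.List.slice nums (some s) (some (s + k))))) ans := by
  intro cnt
  induction cnt with
  | zero =>
    intro i ans hki hin
    rw [PySem.List.pyRange_one_eq_nil (by omega : (nums.length : Int) ≤ i),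
      PySem.List.pyRange_one_eq_nil (by omega : (nums.length : Int) - k + 1 ≤ i - k + 1)]
    rfl
  | succ c ih =>
    intro i ans hki hin
    have hiltn : i < (nums.length : Int) := by omega
    rw [PySem.List.pyRange_one_cons hiltn,
      PySem.List.pyRange_one_cons (by omega : i - k + 1 < (nums.length : Int) - k + 1)]
    simp only [List.foldl_cons]
    rw [pvStep_eq nums k i ans hb hk hki hiltn]
    have ha1 : i - k + 1 = i + 1 - k := by ring
    rw [ha1]
    rw [show i + 1 - k + k = i + 1 by ring]
    exact ih (i + 1) _ (by omega) (by omega)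

-- ===== VERDICT (by name: the statement is the Claim_ definition above) =====
theorem max_of_window_min_abs_diff_spec : Claim_equal_max_of_window_min_abs_diff := by
  intro nums k hDom
  unfold Spec_max_of_window_min_abs_diff
  have hb : ∀ x ∈ nums, -2147483648 ≤ x ∧ x ≤ 2147483648 := by
    intro x hx
    unfold Dom_max_of_window_min_abs_diff at hDom
    rw [Bool.and_eq_true, List.all_eq_true] at hDom
    have h2 := hDom.1 x hx
    simpa [pvDomInt] using h2
  by_cases hk1 : k ≤ 1
  · simp only [max_of_window_min_abs_diff, max_of_window_min_abs_diff_alt, if_pos hk1]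
  · simp only [max_of_window_min_abs_diff, max_of_window_min_abs_diff_alt, if_neg hk1]
    have hk : 2 ≤ k := by omega
    have hsl0 : PySem.List.slice nums none (some k) = nums.take k.toNat :=
      PySem.List.slice_to nums (show (0 : Int) ≤ k by omega)
    have hslk : PySem.List.slice nums (some 0) (some (0 + k)) = nums.take k.toNat := by
      rw [PySem.List.slice_zero_start, show (0 : Int) + k = k by ring, hsl0]
    obtain ⟨hs0, hp0⟩ := pvFoldl_insort (nums.take k.toNat) [] List.Pairwise.nil
    have hw0 : PySem.List.sorted (nums.take k.toNat) (fun x => x) false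
        = (nums.take k.toNat).foldl pvInsort [] :=
      PySem.List.sorted_id_eq_of_perm_of_pairwise _ _ (by simpa using hp0) hs0
    have htb : ∀ x ∈ nums.take k.toNat, -2147483648 ≤ x ∧ x ≤ 2147483648 :=
      fun x hx => hb x (List.mem_of_mem_take hx)
    have hans0 : pvWmdA ((nums.take k.toNat).foldl pvInsort []) = pvMinAdj (nums.take k.toNat) := by
      rw [← hw0]
      exact pvWmd_eq_minAdj _ htb
    rw [hsl0]
    by_cases hkn : k ≤ (nums.length : Int)
    · -- at least one full slide range
      have hm : max 1 ((nums.length : Int) - k + 1) = (nums.length : Int) - k + 1 :=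
        max_eq_right (by omega)
      rw [hm, PySem.List.pyRange_one_cons (by omega : (0 : Int) < (nums.length : Int) - k + 1),
        List.map_cons, PySem.List.max?_id_cons, Option.getD_some, List.foldl_map, hslk]
      have hA := pvLoopA nums k hb hk (((nums.length : Int) - k).toNat) k
        (pvWmdA ((nums.take k.toNat).foldl pvInsort [])) (le_refl k) (by omega)
      rw [show k - k = (0 : Int) by ring, PySem.List.slice_zero_start, hsl0, hw0] at hA
      rw [hA, hans0]
    · -- window larger than the list: no slide, a single window
      have hm : max 1 ((nums.length : Int) - k + 1) = 1 := max_eq_left (by omega)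
      rw [hm, PySem.List.pyRange_one_eq_nil (by omega : (nums.length : Int) ≤ k),
        PySem.List.pyRange_one_cons (by omega : (0 : Int) < 1),
        PySem.List.pyRange_one_eq_nil (by omega : (1 : Int) ≤ 0 + 1), List.map_cons,
        List.map_nil, PySem.List.max?_id_cons, Option.getD_some, List.foldl_nil, List.foldl_nil,
        hslk, hans0]
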